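-- pv_equiv track=rewrite | github.com/sandeepkumar8713/pythonapps | 24_fourthFolder/40_sort_partially_sorted.py | sortPartialSorted28B
-- ===== SOURCE A (Python) =====
-- def sortPartialSorted28B(inpArr):
--     if len(inpArr) == 0:
--         return inpArr
--
--     mask = ~0 << 4
--     curr_28b = inpArr[0] & mask
--     buckets = [0] * 16  # 16 buckets -> n occurrence
--     results = list()
--
--     for num in inpArr:
--         if (num & mask) != curr_28b:    # start sort
--             for bucket, occurrence in enumerate(buckets):
--                 for i in range(occurrence):
--                     results.append(curr_28b | bucket)
--
--             curr_28b = num & mask  # set to next 28 bit group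
--             buckets = [0] * 16     # reset
--         # add to buckets
--         buckets[num & 15] += 1
--
--     for bucket, occurrence in enumerate(buckets):
--         for i in range(occurrence):
--             results.append(curr_28b | bucket)
--
--     return results
-- ===== SOURCE B (Python) =====
-- def sortPartialSorted28B(inpArr):
--     if len(inpArr) == 0:
--         return inpArr
--
--     mask = ~0 << 4
--     results = []
--     i = 0
--     n = len(inpArr)
--     while i < n:
--         # find the end of the contiguous run sharing the high 28 bits
--         key = inpArr[i] & mask
--         j = i + 1
--         while j < n and (inpArr[j] & mask) == key:
--             j += 1
--         # within the run all elements share the high bits, so sorting by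
--         # value is exactly the counting sort on the low 4 bits
--         results.extend(sorted(inpArr[i:j]))
--         i = j
--     return results
-- ===== Notes on version B (the rewrite author's own statement) =====
-- stated objective: simpler
-- what changed: Replaces the manual 16-bucket counting sort with flush-on-change state by a run decomposition: scan contiguous runs of equal high-28-bit key and append sorted(run), which coincides with the bucket emission because within a run value order equals low-4-bit order.
import Mathlib
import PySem

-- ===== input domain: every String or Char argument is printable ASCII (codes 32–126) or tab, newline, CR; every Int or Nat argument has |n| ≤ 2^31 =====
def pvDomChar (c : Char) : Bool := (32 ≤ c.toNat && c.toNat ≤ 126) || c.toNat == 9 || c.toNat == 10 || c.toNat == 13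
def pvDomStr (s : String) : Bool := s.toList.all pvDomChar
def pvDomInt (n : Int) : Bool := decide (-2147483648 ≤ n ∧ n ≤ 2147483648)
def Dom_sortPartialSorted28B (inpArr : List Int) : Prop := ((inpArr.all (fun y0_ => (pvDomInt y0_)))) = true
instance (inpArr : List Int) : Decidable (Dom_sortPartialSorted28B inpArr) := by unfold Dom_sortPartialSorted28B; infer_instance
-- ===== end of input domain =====

-- B replaces A's 16-bucket counting sort (flushed whenever the high-28-bit key changes) by a
-- simpler run decomposition: sort each contiguous run of equal high bits by value; same result.

-- ===== PORT A =====
-- the trailing/flush emission: for bucket, occurrence in enumerate(buckets): for i in range(occurrence): results.append(curr | bucket)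
def pvFlushA (curr : Int) (buckets : List Int) (results : List Int) : List Int :=
  (PySem.List.enumerate buckets).foldl
    (fun res p => (PySem.List.pyRange 0 p.2 1).foldl (fun r _ => r ++ [PySem.Int.bor curr p.1]) res)
    results

-- one iteration of A's for-loop over num, state = (curr_28b, buckets, results)
def pvStepA (mask : Int) (st : Int × List Int × List Int) (num : Int) : Int × List Int × List Int :=
  let st' :=
    if PySem.Int.band num mask ≠ st.1 then
      (PySem.Int.band num mask, List.replicate 16 (0 : Int), pvFlushA st.1 st.2.1 st.2.2)
    else st
  -- buckets[num & 15] += 1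
  (st'.1, st'.2.1.modify (PySem.Int.band num 15).toNat (· + 1), st'.2.2)

def sortPartialSorted28B (inpArr : List Int) : List Int :=
  if inpArr.length = 0 then inpArr
  else
    let mask : Int := Int.not 0 <<< (4 : Nat)
    -- inpArr[0]: the list is nonempty under the guard, so headI is exact
    let st := inpArr.foldl (pvStepA mask)
      (PySem.Int.band inpArr.headI mask, List.replicate 16 (0 : Int), ([] : List Int))
    pvFlushA st.1 st.2.1 st.2.2

-- ===== PORT B =====
-- Source B's outer while loop: peel off one maximal run of equal (num & mask), append sorted(run)
def pvRunsB (mask : Int) : List Int → List Int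
  | [] => []
  | x :: xs =>
    let key := PySem.Int.band x mask
    PySem.List.sorted (x :: xs.takeWhile (fun y => PySem.Int.band y mask == key)) (fun v => v)
      ++ pvRunsB mask (xs.dropWhile (fun y => PySem.Int.band y mask == key))
termination_by l => l.length
decreasing_by
  exact Nat.lt_succ_of_le (List.length_dropWhile_le _ _)

def sortPartialSorted28B_alt (inpArr : List Int) : List Int :=
  if inpArr.length = 0 then inpArr
  else pvRunsB (Int.not 0 <<< (4 : Nat)) inpArr

-- ===== PRECONDITION & SPEC =====
def Spec_sortPartialSorted28B (inpArr : List Int) (out : List Int) : Prop := out = sortPartialSorted28B_alt inpArr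
instance (inpArr : List Int) (out : List Int) : Decidable (Spec_sortPartialSorted28B inpArr out) := by unfold Spec_sortPartialSorted28B; infer_instance

-- ===== CLAIM (what is proved, stated in full; the proofs are below) =====
def Claim_equal_sortPartialSorted28B : Prop := ∀ (inpArr : List Int), Dom_sortPartialSorted28B inpArr → Spec_sortPartialSorted28B inpArr (sortPartialSorted28B inpArr)

-- ===== LEMMAS AND PROOFS =====

-- ---------- bit-level facts ----------

theorem pv_pow16_le {j : Nat} (h : ¬ j < 4) : (16 : Nat) ≤ 2 ^ j := by
  calc (16 : Nat) = 2 ^ 4 := rfl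
    _ ≤ 2 ^ j := Nat.pow_le_pow_right (by norm_num) (by omega)

theorem pv_testBit_lowhigh (q r : Nat) (hr : r < 16) (j : Nat) :
    (16 * q + r).testBit j = if j < 4 then r.testBit j else q.testBit (j - 4) := by
  have h := Nat.testBit_two_pow_mul_add q (i := 4) (by simpa using hr) j
  simpa using h

theorem pv_low_and (q r : Nat) (hr : r < 16) : (16 * q + r) &&& 15 = r := by
  apply Nat.eq_of_testBit_eq
  intro j
  rw [Nat.testBit_and, pv_testBit_lowhigh q r hr]
  by_cases h : j < 4
  · have h15 : (15 : Nat).testBit j = true := by interval_cases j <;> decide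
    simp [h, h15]
  · have h15 : (15 : Nat).testBit j = false := Nat.testBit_lt_two_pow (by have := pv_pow16_le h; omega)
    have hrj : r.testBit j = false := Nat.testBit_lt_two_pow (by have := pv_pow16_le h; omega)
    simp [h, h15, hrj]

theorem pv_low_and' (q b : Nat) (hb : b < 16) : (16 * q + 15) &&& b = b := by
  apply Nat.eq_of_testBit_eq
  intro j
  rw [Nat.testBit_and, pv_testBit_lowhigh q 15 (by norm_num)]
  by_cases h : j < 4
  · have h15 : (15 : Nat).testBit j = true := by interval_cases j <;> decide
    simp [h, h15]
  · have hbj : b.testBit j = false := Nat.testBit_lt_two_pow (by have := pv_pow16_le h; omega)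
    simp [h, hbj]

theorem pv_low_or (q r b : Nat) (hr : r < 16) (hb : b < 16) :
    (16 * q + r) ||| b = 16 * q + (r ||| b) := by
  have hrb : r ||| b < 16 := by
    have := Nat.or_lt_two_pow (n := 4) (by simpa using hr) (by simpa using hb)
    simpa using this
  apply Nat.eq_of_testBit_eq
  intro j
  rw [Nat.testBit_or, pv_testBit_lowhigh q r hr, pv_testBit_lowhigh q _ hrb]
  by_cases h : j < 4
  · simp [h, Nat.testBit_or]
  · have hbj : b.testBit j = false := Nat.testBit_lt_two_pow (by have := pv_pow16_le h; omega)
    simp [h, hbj]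

theorem pv_small_or_15 (r : Nat) (hr : r < 16) : r ||| 15 = 15 := by
  interval_cases r <;> decide

theorem pv_band15 (y : Int) : PySem.Int.band y 15 = y % 16 := by
  by_cases hy : 0 ≤ y
  · simp only [PySem.Int.band, if_pos hy, if_pos (show (0:Int) ≤ 15 by norm_num)]
    rw [show ((15:Int).toNat) = 15 from rfl]
    conv_lhs => rw [← Nat.div_add_mod y.toNat 16]
    rw [pv_low_and _ _ (Nat.mod_lt _ (by norm_num))]
    omega
  · simp only [PySem.Int.band, if_neg hy, if_pos (show (0:Int) ≤ 15 by norm_num)]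
    rw [show ((15:Int).toNat) = 15 from rfl]
    set n := (-y - 1).toNat with hn
    have hcomm : 15 &&& n = n &&& 15 := Nat.and_comm _ _
    have h : n &&& 15 = n % 16 := by
      conv_lhs => rw [← Nat.div_add_mod n 16]
      rw [pv_low_and _ _ (Nat.mod_lt _ (by norm_num))]
    rw [hcomm, h]
    omega

theorem pv_bandM16 (y : Int) : PySem.Int.band y (-16) = y - y % 16 := by
  by_cases hy : 0 ≤ y
  · simp only [PySem.Int.band, if_pos hy, if_neg (show ¬ (0:Int) ≤ -16 by norm_num)]
    rw [show ((-(-16:Int) - 1).toNat) = 15 from rfl]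
    have h : y.toNat &&& 15 = y.toNat % 16 := by
      conv_lhs => rw [← Nat.div_add_mod y.toNat 16]
      rw [pv_low_and _ _ (Nat.mod_lt _ (by norm_num))]
    rw [h]; omega
  · simp only [PySem.Int.band, if_neg hy, if_neg (show ¬ (0:Int) ≤ -16 by norm_num)]
    rw [show ((-(-16:Int) - 1).toNat) = 15 from rfl]
    set n := (-y - 1).toNat with hn
    have h : n ||| 15 = 16 * (n / 16) + 15 := by
      conv_lhs => rw [← Nat.div_add_mod n 16]
      rw [pv_low_or _ _ _ (Nat.mod_lt _ (by norm_num)) (by norm_num),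
        pv_small_or_15 _ (Nat.mod_lt _ (by norm_num))]
    rw [h]; omega

theorem pv_bor_aligned (c : Int) (hc : (16:Int) ∣ c) (b : Int) (hb0 : 0 ≤ b) (hb : b < 16) :
    PySem.Int.bor c b = c + b := by
  obtain ⟨k, hk⟩ := hc
  by_cases hcpos : 0 ≤ c
  · simp only [PySem.Int.bor, if_pos hcpos, if_pos hb0]
    have hcN : c.toNat = 16 * (c.toNat / 16) + 0 := by omega
    have h : c.toNat ||| b.toNat = c.toNat + b.toNat := by
      conv_lhs => rw [hcN]
      rw [pv_low_or _ _ _ (by norm_num) (by omega), Nat.zero_or]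
      omega
    rw [h]; omega
  · simp only [PySem.Int.bor, if_neg hcpos, if_pos hb0]
    set n := (-c - 1).toNat with hn
    have hnN : n = 16 * (n / 16) + 15 := by omega
    have h : n &&& b.toNat = b.toNat := by
      conv_lhs => rw [hnN]
      rw [pv_low_and' _ _ (by omega)]
    rw [h]; omega

theorem pv_mask_val : (Int.not 0 <<< (4 : Nat)) = (-16 : Int) := by decide

-- ---------- bucket-count abstractions ----------

def pvCnt (b : Nat) (ys : List Int) : Nat :=
  ys.countP (fun y => PySem.Int.band y 15 == (b : Int))

def pvCounts (ys : List Int) : List Int :=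
  (List.range 16).map (fun b => ((pvCnt b ys : Nat) : Int))

def pvEmit (c : Int) (ys : List Int) : List Int :=
  (List.range 16).flatMap (fun b => List.replicate (pvCnt b ys) (PySem.Int.bor c (b : Int)))

theorem pv_counts_nil : pvCounts [] = List.replicate 16 (0 : Int) := by decide

theorem pv_counts_snoc (ys : List Int) (h : Int) :
    (pvCounts ys).modify (PySem.Int.band h 15).toNat (· + 1) = pvCounts (ys ++ [h]) := by
  have hlow : PySem.Int.band h 15 = h % 16 := pv_band15 h
  apply List.ext_getElem
  · simp [pvCounts, List.length_modify]
  · intro j hj hj'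
    have hj16 : j < 16 := by simpa [pvCounts, List.length_modify] using hj
    rw [List.getElem_modify]
    simp only [pvCounts, List.getElem_map, List.getElem_range]
    have hcnt : pvCnt j (ys ++ [h]) =
        pvCnt j ys + (if PySem.Int.band h 15 == (j : Int) then 1 else 0) := by
      simp [pvCnt, List.countP_append, List.countP_cons]
    by_cases hk : (PySem.Int.band h 15).toNat = j
    · have : PySem.Int.band h 15 = (j : Int) := by omega
      simp [hcnt, this]
    · have : ¬ (PySem.Int.band h 15 == (j : Int)) = true := by
        simp only [beq_iff_eq]; omega
      simp [hk, hcnt, this]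

-- ---------- the flush loop emits pvEmit ----------

theorem pv_rep_foldl (v : Int) (l : List Int) (res : List Int) :
    l.foldl (fun r _ => r ++ [v]) res = res ++ List.replicate l.length v := by
  induction l generalizing res with
  | nil => simp
  | cons x t ih =>
    rw [List.foldl_cons, ih, List.append_assoc]
    rfl

theorem pv_range_app (v : Int) (occ : Int) (res : List Int) :
    (PySem.List.pyRange 0 occ 1).foldl (fun r _ => r ++ [v]) res
      = res ++ List.replicate occ.toNat v := by
  rw [pv_rep_foldl, PySem.List.length_pyRange_one]
  norm_num

theorem pv_flush_emit (c : Int) (ys : List Int) (r : List Int) :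
    pvFlushA c (pvCounts ys) r = r ++ pvEmit c ys := by
  have hr : List.range 16 = [0,1,2,3,4,5,6,7,8,9,10,11,12,13,14,15] := by decide
  simp only [pvFlushA, pvCounts, pvEmit, hr, List.map_cons, List.map_nil,
    PySem.List.enumerate, List.foldl_cons, List.foldl_nil, pv_range_app,
    List.flatMap_cons, List.flatMap_nil, Int.toNat_natCast, List.append_assoc,
    List.append_nil]
  norm_num

-- ---------- pvEmit is the sorted run ----------

theorem pv_flat_perm (g : Nat → Int) (f f' : Nat → Nat) (k : Nat)
    (hf : ∀ b, f' b = f b + if b = k then 1 else 0) :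
    ∀ (L : List Nat), L.Nodup → k ∈ L →
    (L.flatMap (fun b => List.replicate (f' b) (g b))).Perm
      (g k :: L.flatMap (fun b => List.replicate (f b) (g b))) := by
  intro L
  induction L with
  | nil => intro _ hk; cases hk
  | cons b L' ih =>
    intro hnd hk
    have hnd' : L'.Nodup := (List.nodup_cons.mp hnd).2
    by_cases hb : b = k
    · subst hb
      have hnotin : b ∉ L' := (List.nodup_cons.mp hnd).1
      have htail : L'.flatMap (fun b' => List.replicate (f' b') (g b'))
          = L'.flatMap (fun b' => List.replicate (f b') (g b')) := by
        apply List.flatMap_congr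
        intro b' hb'
        have : b' ≠ b := fun h => hnotin (h ▸ hb')
        rw [hf b', if_neg this, Nat.add_zero]
      simp only [List.flatMap_cons, htail, hf b, if_true]
      rw [List.replicate_succ]
      exact List.Perm.refl _
    · have hk' : k ∈ L' := by
        rcases List.mem_cons.mp hk with h1 | h1
        · exact absurd h1.symm hb
        · exact h1
      simp only [List.flatMap_cons, hf b, if_neg hb, Nat.add_zero]
      refine List.Perm.trans ((ih hnd' hk').append_left (List.replicate (f b) (g b))) ?_
      have hm := List.perm_middle (a := g k)
        (l₁ := List.replicate (f b) (g b))
        (l₂ := L'.flatMap fun b' => List.replicate (f b') (g b'))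
      simpa using hm

theorem pv_run_val {y c : Int} (hy : PySem.Int.band y (-16) = c) :
    PySem.Int.bor c ((PySem.Int.band y 15).toNat : Int) = y := by
  have h15 := pv_band15 y
  have h16 := pv_bandM16 y
  have hc : c = y - y % 16 := by omega
  have hdvd : (16:Int) ∣ c := by
    refine ⟨y / 16, ?_⟩
    omega
  have hlow : ((PySem.Int.band y 15).toNat : Int) = y % 16 := by omega
  rw [hlow, pv_bor_aligned c hdvd _ (by omega) (by omega)]
  omega

theorem pv_emit_perm (c : Int) :
    ∀ ys : List Int, (∀ y ∈ ys, PySem.Int.band y (-16) = c) → (pvEmit c ys).Perm ys := by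
  intro ys
  induction ys with
  | nil => intro _; simp [pvEmit, pvCnt]
  | cons y t ih =>
    intro hall
    have hy : PySem.Int.band y (-16) = c := hall y (List.mem_cons_self)
    have h15 := pv_band15 y
    set k : Nat := (PySem.Int.band y 15).toNat with hk
    have hkmem : k ∈ List.range 16 := by
      apply List.mem_range.mpr
      omega
    have hcnt : ∀ b : Nat, pvCnt b (y :: t) = pvCnt b t + if b = k then 1 else 0 := by
      intro b
      simp only [pvCnt, List.countP_cons, beq_iff_eq]
      split_ifs with h1 h2 h2 <;> omega
    have hperm := pv_flat_perm (fun b => PySem.Int.bor c (b : Int))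
      (fun b => pvCnt b t) (fun b => pvCnt b (y :: t)) k hcnt
      (List.range 16) (List.nodup_range) hkmem
    have hgk : PySem.Int.bor c (k : Int) = y := pv_run_val hy
    refine List.Perm.trans ?_ ((ih (fun z hz => hall z (List.mem_cons_of_mem _ hz))).cons y)
    simpa [pvEmit, hgk] using hperm

theorem pv_emit_pairwise (c : Int) (hc : (16:Int) ∣ c) (ys : List Int) :
    (pvEmit c ys).Pairwise (· ≤ ·) := by
  unfold pvEmit
  rw [List.pairwise_flatMap]
  constructor
  · intro a _
    exact List.pairwise_replicate.mpr (Or.inr le_rfl)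
  · rw [List.pairwise_iff_getElem]
    intro i j hi hj hij
    simp only [List.getElem_range] at *
    intro x hx y hy
    have hxi : x = PySem.Int.bor c (i : Int) := (List.eq_of_mem_replicate hx)
    have hyj : y = PySem.Int.bor c (j : Int) := (List.eq_of_mem_replicate hy)
    have hi16 : i < 16 := by simpa using hi
    have hj16 : j < 16 := by simpa using hj
    rw [hxi, hyj, pv_bor_aligned c hc _ (by omega) (by omega),
      pv_bor_aligned c hc _ (by omega) (by omega)]
    omega

theorem pv_sorted_run (c : Int) (ys : List Int)
    (hall : ∀ y ∈ ys, PySem.Int.band y (-16) = c) :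
    PySem.List.sorted ys (fun v => v) = pvEmit c ys := by
  cases ys with
  | nil => simp [pvEmit, pvCnt, PySem.List.sorted]
  | cons y t =>
    have hy : PySem.Int.band y (-16) = c := hall y (List.mem_cons_self)
    have h16 := pv_bandM16 y
    have hdvd : (16:Int) ∣ c := ⟨y / 16, by omega⟩
    exact PySem.List.sorted_id_eq_of_perm_of_pairwise _ _
      (pv_emit_perm c _ hall) (pv_emit_pairwise c hdvd _)

-- ---------- the loop-level correspondence ----------

def pvGo2 (c : Int) (ys : List Int) : List Int → List Int
  | [] => PySem.List.sorted ys (fun v => v)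
  | h :: t =>
    if PySem.Int.band h (-16) = c then pvGo2 c (ys ++ [h]) t
    else PySem.List.sorted ys (fun v => v) ++ pvGo2 (PySem.Int.band h (-16)) [h] t

theorem pv_loop (l : List Int) :
    ∀ (c : Int) (ys r : List Int), (∀ y ∈ ys, PySem.Int.band y (-16) = c) →
    pvFlushA (l.foldl (pvStepA (-16)) (c, pvCounts ys, r)).1
        (l.foldl (pvStepA (-16)) (c, pvCounts ys, r)).2.1
        (l.foldl (pvStepA (-16)) (c, pvCounts ys, r)).2.2
      = r ++ pvGo2 c ys l := by
  induction l with
  | nil =>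
    intro c ys r hall
    show pvFlushA c (pvCounts ys) r = r ++ pvGo2 c ys []
    simp only [pvGo2]
    rw [pv_flush_emit, pv_sorted_run c ys hall]
  | cons h t ih =>
    intro c ys r hall
    by_cases hc : PySem.Int.band h (-16) = c
    · have hstep : pvStepA (-16) (c, pvCounts ys, r) h = (c, pvCounts (ys ++ [h]), r) := by
        simp [pvStepA, hc, pv_counts_snoc]
      have hall' : ∀ y ∈ ys ++ [h], PySem.Int.band y (-16) = c := by
        intro y hy
        rcases List.mem_append.mp hy with h1 | h1
        · exact hall y h1
        · simp at h1; subst h1; exact hc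
      simp only [List.foldl_cons, hstep, pvGo2, if_pos hc]
      exact ih c (ys ++ [h]) r hall'
    · have hstep : pvStepA (-16) (c, pvCounts ys, r) h
          = (PySem.Int.band h (-16), pvCounts [h], pvFlushA c (pvCounts ys) r) := by
        have hsingle : (pvCounts []).modify (PySem.Int.band h 15).toNat (· + 1) = pvCounts [h] :=
          pv_counts_snoc [] h
        simp [pvStepA, hc, ← pv_counts_nil, hsingle]
      have hall' : ∀ y ∈ [h], PySem.Int.band y (-16) = PySem.Int.band h (-16) := by
        intro y hy; simp at hy; subst hy; rfl
      simp only [List.foldl_cons, hstep, pvGo2, if_neg hc]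
      rw [ih (PySem.Int.band h (-16)) [h] _ hall', pv_flush_emit,
        pv_sorted_run c ys hall, List.append_assoc]

theorem pv_go2_runs : ∀ (l : List Int) (c : Int) (ys : List Int),
    pvGo2 c ys l
      = PySem.List.sorted (ys ++ l.takeWhile (fun y => PySem.Int.band y (-16) == c)) (fun v => v)
        ++ pvRunsB (-16) (l.dropWhile (fun y => PySem.Int.band y (-16) == c)) := by
  intro l
  induction l with
  | nil => intro c ys; simp [pvGo2, pvRunsB]
  | cons h t ih =>
    intro c ys
    by_cases hc : PySem.Int.band h (-16) = c
    · have hp : (PySem.Int.band h (-16) == c) = true := by simp [hc]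
      simp only [pvGo2, if_pos hc, List.takeWhile_cons, hp, List.dropWhile_cons]
      rw [ih c (ys ++ [h])]
      simp
    · have hp : (PySem.Int.band h (-16) == c) = false := by simp [hc]
      simp only [pvGo2, if_neg hc, List.takeWhile_cons, hp, List.dropWhile_cons]
      simp only [Bool.false_eq_true, if_false, List.append_nil]
      rw [ih (PySem.Int.band h (-16)) [h]]
      rw [pvRunsB]
      simp

-- ===== VERDICT (by name: the statement is the Claim_ definition above) =====
theorem sortPartialSorted28B_spec : Claim_equal_sortPartialSorted28B := by
  unfold Claim_equal_sortPartialSorted28B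
  intro inpArr _
  unfold Spec_sortPartialSorted28B
  cases inpArr with
  | nil => rfl
  | cons x xs =>
    have hne : ¬ ((x :: xs).length = 0) := by simp
    simp only [sortPartialSorted28B, sortPartialSorted28B_alt, if_neg hne, pv_mask_val,
      List.headI]
    have h0 : ∀ y ∈ ([] : List Int), PySem.Int.band y (-16) = PySem.Int.band x (-16) := by
      intro y hy; cases hy
    rw [show (List.replicate 16 (0:Int)) = pvCounts [] from pv_counts_nil.symm]
    rw [pv_loop (x :: xs) (PySem.Int.band x (-16)) [] [] h0, pv_go2_runs]
    have hp : (PySem.Int.band x (-16) == PySem.Int.band x (-16)) = true := by simp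
    rw [pvRunsB]
    simp
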